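-- pv_equiv track=rewrite | github.com/mayarid/mql | mql/utils.py | after
-- ===== SOURCE A (Python) =====
-- def after(l, start):
--   s = start[:]
--   x = l[:]
--   s.reverse()
--   x.reverse()
--   count = 0
--   while len(x) > 0 and s[0] != x[0]:
--     count += 1
--     del x[0]
--   if len(x) == 0:
--     return -1
--   del s[0]
--   while len(x) > 0 and len(s) > 0:
--     if s[0] == x[0]:
--       del s[0]
--     del x[0]
--   if len(s) > 0:
--     return -1
--   return count
-- ===== SOURCE B (Python) =====
-- def after(l, start):
--   rl = l[::-1]
--   if not rl:
--     return -1
--   rs = start[::-1]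
--   t = rs[0]
--   try:
--     count = rl.index(t)
--   except ValueError:
--     return -1
--   it = iter(rl[count:])
--   if all(c in it for c in rs[1:]):
--     return count
--   return -1
-- ===== Notes on version B (the rewrite author's own statement) =====
-- stated objective: faster
-- what changed: Replaces A's repeated del x[0]/del s[0] front-deletion while-loops on reversed copies with a single list.index call plus one iterator-consuming subsequence sweep (all(c in it ...)).
-- outside the precondition, e.g. on after([1], []): A raises IndexError, B raises IndexError
import Mathlib
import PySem

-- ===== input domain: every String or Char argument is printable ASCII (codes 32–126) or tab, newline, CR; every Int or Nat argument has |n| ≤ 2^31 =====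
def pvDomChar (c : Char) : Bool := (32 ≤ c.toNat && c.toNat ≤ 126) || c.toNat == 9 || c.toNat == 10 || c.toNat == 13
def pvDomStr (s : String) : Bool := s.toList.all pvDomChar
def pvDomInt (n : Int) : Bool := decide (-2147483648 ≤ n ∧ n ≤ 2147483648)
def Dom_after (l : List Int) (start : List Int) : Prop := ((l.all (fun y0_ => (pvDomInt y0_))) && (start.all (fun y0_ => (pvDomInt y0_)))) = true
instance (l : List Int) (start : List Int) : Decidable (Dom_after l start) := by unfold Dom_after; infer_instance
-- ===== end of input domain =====

-- B replaces A's quadratic front-deletion loops by one list.index call plus a single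
-- iterator-based subsequence sweep (objective: faster, asymptotic O(n) vs O(n^2)).

-- ===== PORT A =====
-- first while loop: count += 1; del x[0]  until s[0] == x[0]; returns (count, remaining x)
def aLoop1 (s0 : Int) : List Int → Int × List Int
  | [] => (0, [])
  | a :: x =>
    if s0 ≠ a then
      let r := aLoop1 s0 x
      (r.1 + 1, r.2)
    else (0, a :: x)

-- second while loop: if s[0] == x[0]: del s[0]; del x[0]; returns the remaining s
def aLoop2 : List Int → List Int → List Int
  | s, [] => s
  | [], _ :: _ => []
  | a :: s, b :: x => if a == b then aLoop2 s x else aLoop2 (a :: s) x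

def after (l : List Int) (start : List Int) : Int :=
  let x := l.reverse
  let s := start.reverse
  match x, s with
  | [], _ => -1                 -- first loop skipped, len(x) == 0 → -1
  | _ :: _, [] => 0             -- Python raises IndexError (s[0]) here; excluded by Pre_after
  | x, s0 :: srest =>
    let r := aLoop1 s0 x
    if r.2.isEmpty then -1
    else
      let s' := aLoop2 srest r.2   -- after 'del s[0]'
      if s'.isEmpty then r.1 else -1

-- ===== PORT B =====
-- all(c in it for c in cs) over the iterator of xs: greedy scan
def isSubseqIter : List Int → List Int → Bool
  | [], _ => true
  | _ :: _, [] => false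
  | c :: cs, v :: xs => if v == c then isSubseqIter cs xs else isSubseqIter (c :: cs) xs

def after_alt (l : List Int) (start : List Int) : Int :=
  let rl := l.reverse           -- l[::-1]
  if rl.isEmpty then -1
  else
    match start.reverse with    -- rs; rs[0] would raise on empty start (excluded by Pre_after)
    | [] => 0
    | t :: rest =>
      match PySem.List.index? rl t with
      | none => -1                                  -- ValueError branch
      | some count =>
        if isSubseqIter rest (rl.drop count) then (count : Int) else -1

-- ===== PRECONDITION & SPEC =====
-- Pre_ excludes exactly (start = [] with l ≠ []): there Python A raises IndexError on s[0].
def Pre_after (l : List Int) (start : List Int) : Prop := start ≠ [] ∨ l = []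
instance (l : List Int) (start : List Int) : Decidable (Pre_after l start) := by unfold Pre_after; infer_instance
def pvWitness_after : List Int × List Int := ([1, 2, 3], [2])

def Spec_after (l : List Int) (start : List Int) (out : Int) : Prop := out = after_alt l start
instance (l : List Int) (start : List Int) (out : Int) : Decidable (Spec_after l start out) := by unfold Spec_after; infer_instance

-- ===== CLAIM (what is proved, stated in full; the proofs are below) =====
def Claim_equal_after : Prop := ∀ (l : List Int) (start : List Int), Dom_after l start → Pre_after l start → Spec_after l start (after l start)

-- ===== LEMMAS AND PROOFS =====

-- A's first loop, characterised by list.index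
theorem aLoop1_eq (s0 : Int) (x : List Int) :
    aLoop1 s0 x = match PySem.List.index? x s0 with
      | none => ((x.length : Int), [])
      | some k => ((k : Int), x.drop k) := by
  induction x with
  | nil => simp [aLoop1, PySem.List.index?]
  | cons a x ih =>
    by_cases h : s0 = a
    · subst h
      rw [PySem.List.index?_cons_self]
      simp [aLoop1]
    · rw [PySem.List.index?_cons_of_ne _ (Ne.symm h)]
      cases hx : PySem.List.index? x s0 with
      | none => rw [hx] at ih; simp [aLoop1, h, ih]
      | some k => rw [hx] at ih; simp [aLoop1, h, ih]

-- A's second loop leaves an empty s iff B's iterator sweep succeeds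
theorem aLoop2_empty_iff (x s : List Int) :
    (aLoop2 s x).isEmpty = isSubseqIter s x := by
  induction x generalizing s with
  | nil => cases s <;> simp [aLoop2, isSubseqIter]
  | cons v xs ih =>
    cases s with
    | nil => simp [aLoop2, isSubseqIter]
    | cons c cs =>
      by_cases h : c = v
      · subst h; simp [aLoop2, isSubseqIter, ih]
      · simp [aLoop2, isSubseqIter, h, Ne.symm h, ih]

-- ===== VERDICT (by name: the statement is the Claim_ definition above) =====
theorem after_spec : Claim_equal_after := by
  intro l start _ hpre
  unfold Spec_after after after_alt
  rcases hpre with hs | hl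
  · -- start ≠ []
    have hsr : start.reverse ≠ [] := by simpa using hs
    cases hx : l.reverse with
    | nil =>
      cases hsrev : start.reverse with
      | nil => exact absurd hsrev hsr
      | cons s0 srest => simp
    | cons a xs =>
      cases hsrev : start.reverse with
      | nil => exact absurd hsrev hsr
      | cons s0 srest =>
        simp only [List.isEmpty_cons]
        rw [aLoop1_eq]
        cases hi : PySem.List.index? (a :: xs) s0 with
        | none => simp
        | some k =>
          obtain ⟨hk, -, -⟩ := PySem.List.getElem_of_index?_eq_some hi
          have hklt : k < xs.length + 1 := by simpa using hk
          have hne : (a :: xs).drop k ≠ [] := by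
            simp only [ne_eq, List.drop_eq_nil_iff, List.length_cons]
            omega
          have hdrop : ((a :: xs).drop k).isEmpty = false := by
            simpa [List.isEmpty_iff] using hne
          simp [hdrop, aLoop2_empty_iff]
  · -- l = []
    subst hl
    cases start.reverse <;> simp
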